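-- pv_equiv track=rewrite | github.com/lkcbharath/Lab_Assignments | 5th Semester/IT3xx SC/Lab 4/GA_newer.py | eval_fitness
-- ===== SOURCE A (Python) =====
-- def eval_fitness(population):
--     fitness = []
--     for person in population:
--         a = person[0]
--         b = person[1]
--         c = person[2]
--         d = person[3]
--         # function
--         r = a + (2*b) + (3*c) + (4*d)
--         fitness.append(r)
--     return fitness
-- ===== SOURCE B (Python) =====
-- def eval_fitness(population):
--     # Column-wise: transpose the population into coordinate columns, then
--     # accumulate the weighted columns into a running total, one pass per weight.
--     columns = list(zip(*population)) if population else []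
--     total = [0] * len(population)
--     for w, col in zip((1, 2, 3, 4), columns):
--         total = [t + w * x for t, x in zip(total, col)]
--     return total
-- ===== Notes on version B (the rewrite author's own statement) =====
-- stated objective: alternative
-- what changed: B traverses the data column-wise: it transposes the population into four coordinate columns and accumulates an elementwise running total over the weighted columns (one staged pass per weight), instead of A's row-wise per-person formula.
import Mathlib
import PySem

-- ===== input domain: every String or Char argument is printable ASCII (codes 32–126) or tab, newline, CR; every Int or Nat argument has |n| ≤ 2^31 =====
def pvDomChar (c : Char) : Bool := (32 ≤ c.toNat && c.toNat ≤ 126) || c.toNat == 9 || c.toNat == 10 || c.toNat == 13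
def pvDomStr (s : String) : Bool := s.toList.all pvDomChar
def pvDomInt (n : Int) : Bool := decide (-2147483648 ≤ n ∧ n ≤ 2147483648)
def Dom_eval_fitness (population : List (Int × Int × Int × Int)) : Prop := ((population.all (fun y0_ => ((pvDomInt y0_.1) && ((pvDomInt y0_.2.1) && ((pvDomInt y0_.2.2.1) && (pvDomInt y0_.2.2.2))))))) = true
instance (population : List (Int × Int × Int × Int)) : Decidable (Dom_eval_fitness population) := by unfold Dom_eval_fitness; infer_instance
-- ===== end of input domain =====

-- B computes the same fitness list column-wise: it transposes the population into four
-- coordinate columns and folds an elementwise running total over the weighted columns,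
-- instead of A's row-wise per-person formula (objective: alternative; same O(n) cost).


-- ===== PORT A =====
def eval_fitness (population : List (Int × Int × Int × Int)) : List Int :=
  population.foldl (fun fitness person =>
    let a := person.1
    let b := person.2.1
    let c := person.2.2.1
    let d := person.2.2.2
    let r := a + (2*b) + (3*c) + (4*d)
    fitness ++ [r]) []

-- ===== PORT B =====
-- zip(*population): the four coordinate columns (empty list of columns for an empty population)
def columnsB (population : List (Int × Int × Int × Int)) : List (List Int) :=
  if population = [] then []
  else [population.map (·.1), population.map (·.2.1),
        population.map (·.2.2.1), population.map (·.2.2.2)]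

def eval_fitness_alt (population : List (Int × Int × Int × Int)) : List Int :=
  (([(1:Int), 2, 3, 4]).zip (columnsB population)).foldl
    (fun total wc => (total.zip wc.2).map (fun tx => tx.1 + wc.1 * tx.2))
    (List.replicate population.length 0)

-- ===== PRECONDITION & SPEC =====
def Spec_eval_fitness (population : List (Int × Int × Int × Int)) (out : List Int) : Prop := out = eval_fitness_alt population
instance (population : List (Int × Int × Int × Int)) (out : List Int) : Decidable (Spec_eval_fitness population out) := by unfold Spec_eval_fitness; infer_instance

-- ===== CLAIM (what is proved, stated in full; the proofs are below) =====
def Claim_equal_eval_fitness : Prop := ∀ (population : List (Int × Int × Int × Int)), Dom_eval_fitness population → Spec_eval_fitness population (eval_fitness population)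

-- ===== LEMMAS AND PROOFS =====
theorem pyA_acc (population : List (Int × Int × Int × Int)) (acc : List Int) :
    population.foldl (fun fitness person =>
      fitness ++ [person.1 + (2*person.2.1) + (3*person.2.2.1) + (4*person.2.2.2)]) acc
      = acc ++ population.map (fun p => p.1 + 2*p.2.1 + 3*p.2.2.1 + 4*p.2.2.2) := by
  induction population generalizing acc with
  | nil => simp
  | cons p t ih => simp [List.foldl, ih]

-- one staged pass: adding weight w times a projected column to a total that is a map over pop
theorem zip_map_step {P : Type} (pop : List P) (g proj : P → Int) (w : Int) :
    ((pop.map g).zip (pop.map proj)).map (fun tx => tx.1 + w * tx.2)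
      = pop.map (fun p => g p + w * proj p) := by
  induction pop with
  | nil => rfl
  | cons p t ih => simp [ih]

theorem altEq (population : List (Int × Int × Int × Int)) :
    eval_fitness_alt population
      = population.map (fun p => p.1 + 2*p.2.1 + 3*p.2.2.1 + 4*p.2.2.2) := by
  cases population with
  | nil => rfl
  | cons p t =>
    unfold eval_fitness_alt columnsB
    simp only [if_neg (List.cons_ne_nil p t), List.zip_cons_cons, List.zip_nil_right,
      List.foldl_cons, List.foldl_nil]
    rw [show List.replicate (p :: t).length (0:Int) = (p :: t).map (fun _ => 0) by
          rw [List.map_const']]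
    rw [zip_map_step, zip_map_step, zip_map_step, zip_map_step]
    simp

-- ===== VERDICT (by name: the statement is the Claim_ definition above) =====
theorem eval_fitness_spec : Claim_equal_eval_fitness := by
  intro population _
  unfold Spec_eval_fitness eval_fitness
  rw [pyA_acc, altEq]
  rfl
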